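-- pv_equiv track=rewrite | github.com/gingami/pyworks | comparison.py | gen_min_P
-- ===== SOURCE A (Python) =====
-- def gen_min_P(P):
--     min=None
--     for path in P:
--         length=len(path)
--         if min is None:
--             min = length
--         elif min > length:
--             min = length
--     min_P=set()
--     for path in P:
--         if len(path)==min:
--             min_P.add(path)
--     return min_P
-- ===== SOURCE B (Python) =====
-- def gen_min_P(P):
--     min_len = None
--     min_P = set()
--     for path in P:
--         length = len(path)
--         if min_len is None or length < min_len:
--             min_len = length
--             min_P = {path}
--         elif length == min_len:
--             min_P.add(path)
--     return min_P
-- ===== Notes on version B (the rewrite author's own statement) =====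
-- stated objective: simpler
-- what changed: Fuses A's two passes (compute min length, then collect matching paths) into a single pass that keeps a running minimum and resets/extends the result set as it goes.
import Mathlib
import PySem

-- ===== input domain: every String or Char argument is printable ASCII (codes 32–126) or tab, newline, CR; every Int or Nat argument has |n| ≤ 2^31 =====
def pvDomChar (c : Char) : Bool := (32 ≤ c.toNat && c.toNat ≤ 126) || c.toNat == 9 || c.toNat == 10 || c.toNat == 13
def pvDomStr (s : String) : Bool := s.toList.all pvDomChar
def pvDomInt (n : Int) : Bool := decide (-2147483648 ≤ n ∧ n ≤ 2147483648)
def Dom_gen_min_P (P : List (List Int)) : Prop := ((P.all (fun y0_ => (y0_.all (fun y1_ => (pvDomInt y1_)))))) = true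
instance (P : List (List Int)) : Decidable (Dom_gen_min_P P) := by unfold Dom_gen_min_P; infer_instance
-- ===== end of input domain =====

-- B fuses A's two passes (find min length, then collect) into one pass with a running
-- minimum and a conditionally reset result set; objective: simpler (same O(n) cost).

-- ===== PORT A =====
def gen_min_P (P : List (List Int)) : List (List Int) :=
  -- first loop: min=None; for path in P: ...
  let min : Option Int := P.foldl (fun min path =>
    let length : Int := path.length
    match min with
    | none => some length
    | some m => if m > length then some length else some m) none
  -- second loop: min_P=set(); for path in P: if len(path)==min: min_P.add(path)
  P.foldl (fun min_P path =>
    if some ((path.length : Int)) = min then PySem.Set.add min_P path else min_P)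
    PySem.Set.empty

-- ===== PORT B =====
def gen_min_P_alt (P : List (List Int)) : List (List Int) :=
  (P.foldl (fun st path =>
    let length : Int := path.length
    match st with
    | (none, _) => (some length, PySem.Set.ofList [path])
    | (some m, s) =>
      if length < m then (some length, PySem.Set.ofList [path])
      else if length = m then (some m, PySem.Set.add s path)
      else (some m, s)) ((none : Option Int), PySem.Set.empty)).2

-- ===== PRECONDITION & SPEC =====
def Spec_gen_min_P (P : List (List Int)) (out : List (List Int)) : Prop := out = gen_min_P_alt P
instance (P : List (List Int)) (out : List (List Int)) : Decidable (Spec_gen_min_P P out) := by unfold Spec_gen_min_P; infer_instance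

-- ===== CLAIM (what is proved, stated in full; the proofs are below) =====
def Claim_equal_gen_min_P : Prop := ∀ (P : List (List Int)), Dom_gen_min_P P → Spec_gen_min_P P (gen_min_P P)

-- ===== LEMMAS AND PROOFS =====

-- helpers (proof-only): named versions of the folds above
def pvOptStep (min : Option Int) (path : List Int) : Option Int :=
  let length : Int := path.length
  match min with
  | none => some length
  | some m => if m > length then some length else some m

def pvMinA (m : Int) (L : List (List Int)) : Int :=
  L.foldl (fun m p => if m > (p.length : Int) then (p.length : Int) else m) m

def pvAddIf (M : Int) (s : List (List Int)) (p : List Int) : List (List Int) :=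
  if (p.length : Int) = M then PySem.Set.add s p else s

def pvStepB (st : Option Int × List (List Int)) (path : List Int) : Option Int × List (List Int) :=
  let length : Int := path.length
  match st with
  | (none, _) => (some length, PySem.Set.ofList [path])
  | (some m, s) =>
    if length < m then (some length, PySem.Set.ofList [path])
    else if length = m then (some m, PySem.Set.add s path)
    else (some m, s)

lemma pvMinA_cons (m : Int) (p : List Int) (L : List (List Int)) :
    pvMinA m (p :: L) = pvMinA (if m > (p.length : Int) then (p.length : Int) else m) L := rfl

lemma pvMinA_le (L : List (List Int)) : ∀ m : Int, pvMinA m L ≤ m := by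
  induction L with
  | nil => intro m; simp [pvMinA]
  | cons p L ih =>
    intro m
    rw [pvMinA_cons]
    split_ifs with h
    · exact le_trans (ih _) (by omega)
    · exact ih m

lemma pvOptFold (L : List (List Int)) : ∀ m : Int,
    L.foldl pvOptStep (some m) = some (pvMinA m L) := by
  induction L with
  | nil => intro m; simp [pvMinA]
  | cons p L ih =>
    intro m
    rw [List.foldl_cons, pvMinA_cons]
    show L.foldl pvOptStep (if m > (p.length : Int) then some (p.length : Int) else some m) = _
    split_ifs with h
    · rw [ih]
    · rw [ih]

lemma pvFoldB (L : List (List Int)) : ∀ (m : Int) (s : List (List Int)),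
    L.foldl pvStepB (some m, s) =
      (some (pvMinA m L),
        if pvMinA m L < m then L.foldl (pvAddIf (pvMinA m L)) PySem.Set.empty
        else L.foldl (pvAddIf m) s) := by
  induction L with
  | nil => intro m s; simp [pvMinA]
  | cons p L ih =>
    intro m s
    have hle : pvMinA m (p :: L) ≤ m := pvMinA_le _ m
    rw [List.foldl_cons]
    by_cases h1 : (p.length : Int) < m
    · -- reset branch
      have hstep : pvStepB (some m, s) p = (some (p.length : Int), PySem.Set.ofList [p]) := by
        simp [pvStepB, h1]
      rw [hstep, ih]
      have hmin : pvMinA m (p :: L) = pvMinA (p.length : Int) L := by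
        rw [pvMinA_cons]; simp [show m > (p.length : Int) from h1]
      have hle' : pvMinA (p.length : Int) L ≤ (p.length : Int) := pvMinA_le _ _
      rw [hmin]
      have hlt : pvMinA (p.length : Int) L < m := lt_of_le_of_lt hle' h1
      rw [if_pos hlt]
      by_cases h2 : pvMinA (p.length : Int) L < (p.length : Int)
      · rw [if_pos h2]
        rw [List.foldl_cons]
        have : pvAddIf (pvMinA (p.length : Int) L) PySem.Set.empty p = PySem.Set.empty := by
          unfold pvAddIf; rw [if_neg]; omega
        rw [this]
      · have heq : pvMinA (p.length : Int) L = (p.length : Int) := by omega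
        rw [if_neg h2, List.foldl_cons]
        have : pvAddIf (pvMinA (p.length : Int) L) PySem.Set.empty p = PySem.Set.ofList [p] := by
          simp [pvAddIf, heq, PySem.Set.empty, PySem.Set.ofList, PySem.Set.add]
        rw [this, heq]
    · -- no reset: length ≥ m
      have hmin : pvMinA m (p :: L) = pvMinA m L := by
        rw [pvMinA_cons]; simp [show ¬ m > (p.length : Int) from h1]
      by_cases h2 : (p.length : Int) = m
      · have hstep : pvStepB (some m, s) p = (some m, PySem.Set.add s p) := by
          simp [pvStepB, h2]
        rw [hstep, ih, hmin]
        by_cases h3 : pvMinA m L < m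
        · rw [if_pos h3, if_pos h3, List.foldl_cons]
          have : pvAddIf (pvMinA m L) PySem.Set.empty p = PySem.Set.empty := by
            unfold pvAddIf; rw [if_neg]; omega
          rw [this]
        · rw [if_neg h3, if_neg h3, List.foldl_cons]
          have : pvAddIf m s p = PySem.Set.add s p := by simp [pvAddIf, h2]
          rw [this]
      · have hstep : pvStepB (some m, s) p = (some m, s) := by
          simp [pvStepB, h2]; omega
        rw [hstep, ih, hmin]
        by_cases h3 : pvMinA m L < m
        · rw [if_pos h3, if_pos h3, List.foldl_cons]
          have : pvAddIf (pvMinA m L) PySem.Set.empty p = PySem.Set.empty := by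
            unfold pvAddIf; rw [if_neg]; omega
          rw [this]
        · rw [if_neg h3, if_neg h3, List.foldl_cons]
          have : pvAddIf m s p = s := by simp [pvAddIf, h2]
          rw [this]

lemma pvA_filter (L : List (List Int)) (M : Int) : ∀ s : List (List Int),
    L.foldl (fun min_P path =>
      if some ((path.length : Int)) = some M then PySem.Set.add min_P path else min_P) s
      = L.foldl (pvAddIf M) s := by
  induction L with
  | nil => intro s; rfl
  | cons p L ih =>
    intro s
    rw [List.foldl_cons, List.foldl_cons]
    have : (if some ((p.length : Int)) = some M then PySem.Set.add s p else s) = pvAddIf M s p := by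
      simp [pvAddIf]
    rw [this, ih]

-- ===== VERDICT (by name: the statement is the Claim_ definition above) =====
theorem gen_min_P_spec : Claim_equal_gen_min_P := by
  intro P _
  unfold Spec_gen_min_P gen_min_P gen_min_P_alt
  cases P with
  | nil => rfl
  | cons p L =>
    show (p :: L).foldl (fun min_P path =>
        if some ((path.length : Int)) = (p :: L).foldl pvOptStep none then PySem.Set.add min_P path else min_P)
        PySem.Set.empty
      = (L.foldl pvStepB (pvStepB ((none : Option Int), PySem.Set.empty) p)).2
    have hstep : pvStepB ((none : Option Int), PySem.Set.empty) p
        = (some (p.length : Int), PySem.Set.ofList [p]) := rfl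
    have hmin : (p :: L).foldl pvOptStep none = some (pvMinA (p.length : Int) L) := by
      rw [List.foldl_cons]
      show L.foldl pvOptStep (some (p.length : Int)) = _
      exact pvOptFold L _
    rw [hmin, pvA_filter, hstep, pvFoldB]
    set M := pvMinA (p.length : Int) L with hM
    have hle : M ≤ (p.length : Int) := pvMinA_le _ _
    rw [List.foldl_cons]
    by_cases h : M < (p.length : Int)
    · rw [if_pos h]
      have : pvAddIf M PySem.Set.empty p = PySem.Set.empty := by
        unfold pvAddIf; rw [if_neg]; omega
      rw [this]
    · have heq : M = (p.length : Int) := by omega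
      rw [if_neg h]
      have : pvAddIf M PySem.Set.empty p = PySem.Set.ofList [p] := by
        unfold pvAddIf; rw [if_pos heq.symm]; rfl
      rw [this, heq]
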